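-- pv_equiv track=rewrite | github.com/chucklorence/Advent_Of_Code | 2022_Fall/2019_04/2019_04_Part_01.py | MeetsAdjacentRules
-- ===== SOURCE A (Python) =====
-- def MeetsAdjacentRules(num):
--     strNum = str(num)
--     numLength = len(strNum)
--     adjacentSame = False
--     adjacentNotDecrease = False
--     # Check for duplicates - need at least one
--     for i in range(0,numLength - 1):
--         if strNum[i] == strNum[i+1]:
--             adjacentSame = True
--             break
--
--     # Check for adjacent same or increasing
--     for i in range(0,numLength - 1):
--         if (strNum[i] <= strNum[i+1]):
--             adjacentNotDecrease = True
--         else: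
--             adjacentNotDecrease = False
--             break
--
--     if adjacentSame == True and adjacentNotDecrease == True:
--         return True
--     else:
--         return False
-- ===== SOURCE B (Python) =====
-- def MeetsAdjacentRules(num):
--     s = str(num)
--     return s == ''.join(sorted(s)) and len(set(s)) < len(s)
-- ===== Notes on version B (the rewrite author's own statement) =====
-- stated objective: simpler
-- what changed: Replaced A's two explicit pairwise index loops with break flags by a two-liner: the string equals its sorted form (non-decreasing) and has a repeated character (set smaller than string); sortedness makes any duplicate adjacent.
import Mathlib
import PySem

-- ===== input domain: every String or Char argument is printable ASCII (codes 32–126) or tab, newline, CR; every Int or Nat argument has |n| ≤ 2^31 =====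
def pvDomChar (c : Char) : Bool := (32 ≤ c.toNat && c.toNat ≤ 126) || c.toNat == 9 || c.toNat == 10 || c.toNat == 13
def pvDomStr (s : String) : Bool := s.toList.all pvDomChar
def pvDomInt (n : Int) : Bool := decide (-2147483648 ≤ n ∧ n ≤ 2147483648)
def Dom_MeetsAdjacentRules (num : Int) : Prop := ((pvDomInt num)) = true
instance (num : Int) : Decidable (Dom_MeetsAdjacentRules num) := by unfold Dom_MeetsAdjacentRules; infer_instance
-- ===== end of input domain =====

-- B replaces A's two pairwise index scans with "s equals sorted(s) and has a repeated char" (simpler).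

-- ===== PORT A =====
-- first loop of A: scan adjacent pairs, break (true) on the first equal pair
def pvASame : List Char → Bool
  | c1 :: c2 :: rest => if c1 == c2 then true else pvASame (c2 :: rest)
  | _ => false

-- second loop of A: flag true on each non-decreasing pair, break (false) on a decrease;
-- final flag is true iff there is at least one pair and every pair is non-decreasing
def pvANonDec : List Char → Bool
  | c1 :: c2 :: c3 :: rest => if c1 ≤ c2 then pvANonDec (c2 :: c3 :: rest) else false
  | [c1, c2] => decide (c1 ≤ c2)
  | _ => false

def MeetsAdjacentRules (num : Int) : Bool :=
  let strNum := PySem.Int.toChars num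
  let adjacentSame := pvASame strNum
  let adjacentNotDecrease := pvANonDec strNum
  if adjacentSame = true ∧ adjacentNotDecrease = true then true else false

-- ===== PORT B =====
def MeetsAdjacentRules_alt (num : Int) : Bool :=
  let s := PySem.Int.toChars num
  decide (PySem.List.sorted s (fun c => c) false = s) && decide ((PySem.Set.ofList s).length < s.length)

-- ===== PRECONDITION & SPEC =====
def Spec_MeetsAdjacentRules (num : Int) (out : Bool) : Prop := out = MeetsAdjacentRules_alt num
instance (num : Int) (out : Bool) : Decidable (Spec_MeetsAdjacentRules num out) := by unfold Spec_MeetsAdjacentRules; infer_instance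

-- ===== CLAIM (what is proved, stated in full; the proofs are below) =====
def Claim_equal_MeetsAdjacentRules : Prop := ∀ (num : Int), Dom_MeetsAdjacentRules num → Spec_MeetsAdjacentRules num (MeetsAdjacentRules num)

-- ===== LEMMAS AND PROOFS =====


theorem pvANonDec_iff : ∀ (l : List Char), pvANonDec l = true ↔ l.IsChain (· ≤ ·) ∧ 2 ≤ l.length
  | [] => by simp [pvANonDec]
  | [c] => by simp [pvANonDec]
  | [c1, c2] => by simp [pvANonDec]
  | c1 :: c2 :: c3 :: rest => by
    by_cases h : c1 ≤ c2
    · simp only [pvANonDec, if_pos h, pvANonDec_iff (c2 :: c3 :: rest)]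
      simp [h]
    · simp [pvANonDec, h]

theorem pvASame_iff_not_nodup : ∀ (l : List Char), l.Pairwise (· ≤ ·) →
    (pvASame l = true ↔ ¬ l.Nodup)
  | [], _ => by simp [pvASame]
  | [c], _ => by simp [pvASame]
  | c1 :: c2 :: t, h => by
    by_cases hc : c1 = c2
    · subst hc
      simp [pvASame, List.nodup_cons]
    · have hne : (c1 == c2) = false := by simp [hc]
      have IH := pvASame_iff_not_nodup (c2 :: t) h.tail
      have hmem : c1 ∉ c2 :: t := by
        intro hm
        rcases List.mem_cons.mp hm with h1 | h1
        · exact hc h1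
        · have h12 : c1 ≤ c2 := (List.pairwise_cons.mp h).1 c2 (by simp)
          have h21 : c2 ≤ c1 := (List.pairwise_cons.mp h.tail).1 c1 h1
          exact hc (le_antisymm h12 h21)
      simp only [pvASame, hne, Bool.false_eq_true, if_false, IH, List.nodup_cons]
      tauto

theorem dedup_length_lt_iff (l : List Char) :
    (PySem.List.dedup l).length < l.length ↔ ¬ l.Nodup := by
  have h1 : (PySem.List.dedup l).length = l.toFinset.card := by
    rw [← List.toFinset_card_of_nodup (PySem.List.nodup_dedup l)]
    congr 1
    ext x
    simp
  rw [h1]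
  constructor
  · intro h hn
    rw [List.toFinset_card_of_nodup hn] at h
    omega
  · intro hn
    rcases lt_or_eq_of_le (List.toFinset_card_le l) with h | h
    · exact h
    · exact absurd (Multiset.toFinset_card_eq_card_iff_nodup.mp h) hn

theorem sorted_eq_self_iff (l : List Char) :
    PySem.List.sorted l (fun c => c) false = l ↔ l.Pairwise (· ≤ ·) := by
  constructor
  · intro h
    have hp := PySem.List.sorted_pairwise l (fun c => c) 
    rw [h] at hp
    exact hp
  · intro h
    exact PySem.List.sorted_eq_self_of_pairwise l (fun c => c) h

theorem not_nodup_two_le_length (l : List Char) (h : ¬ l.Nodup) : 2 ≤ l.length := by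
  rcases l with _ | ⟨a, _ | ⟨b, t⟩⟩
  · simp at h
  · simp at h
  · simp

-- ===== VERDICT (by name: the statement is the Claim_ definition above) =====
theorem MeetsAdjacentRules_spec : Claim_equal_MeetsAdjacentRules := by
  intro num _
  unfold Spec_MeetsAdjacentRules MeetsAdjacentRules MeetsAdjacentRules_alt
  set l := PySem.Int.toChars num with hl
  by_cases hp : l.Pairwise (· ≤ ·)
  · have hs : PySem.List.sorted l (fun c => c) false = l := (sorted_eq_self_iff l).mpr hp
    have hset : ((PySem.Set.ofList l).length < l.length) ↔ ¬ l.Nodup := by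
      simpa [PySem.List.dedup] using dedup_length_lt_iff l
    by_cases hn : l.Nodup
    · have hsame : pvASame l ≠ true := fun ht => (pvASame_iff_not_nodup l hp).mp ht hn
      have hlt : ¬ ((PySem.Set.ofList l).length < l.length) := fun hx => hset.mp hx hn
      simp [hsame, hlt]
    · have hsame : pvASame l = true := (pvASame_iff_not_nodup l hp).mpr hn
      have hnd : pvANonDec l = true := (pvANonDec_iff l).mpr
        ⟨List.isChain_iff_pairwise.mpr hp, not_nodup_two_le_length l hn⟩
      simp [hsame, hnd, hs, hset.mpr hn]
  · have hs : PySem.List.sorted l (fun c => c) false ≠ l := fun hx =>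
      hp ((sorted_eq_self_iff l).mp hx)
    have hnd : pvANonDec l ≠ true := fun ht =>
      hp (List.isChain_iff_pairwise.mp ((pvANonDec_iff l).mp ht).1)
    simp [hs, hnd]
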